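-- pv_equiv track=rewrite | github.com/jhatzimalis/host-comparer | main.py | sort_ips
-- ===== SOURCE A (Python) =====
-- def sort_ips(ips):
--     """
--     Sorts a list of IP addresses, sorts the IPv4 addresses as integers, and appends the sorted IPv6 addresses to the sorted IPv4 addresses.
--     Args: ips (list) - a list of IP addresses
--     Returns: List of sorted IP addresses
--     """
--     # Split IP addresses into IPv4 and IPv6 addresses
--     ipv4_addrs = []
--     ipv6_addrs = []
--     for ip in ips:
--         # Check if the IP address contains a dot (for IPv4) or not (for IPv6)
--         if '.' in ip:
--             ipv4_addrs.append(ip)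
--         else:
--             ipv6_addrs.append(ip)
--
--     # Sort IPv4 addresses as integers and append sorted IPv6 addresses
--     sorted_ipv4 = sorted(ipv4_addrs, key=lambda x: [int(i) for i in x.split('.')])
--     sorted_ipv6 = sorted(ipv6_addrs)
--     sorted_ips = sorted_ipv4 + sorted_ipv6
--
--     return sorted_ips
-- ===== SOURCE B (Python) =====
-- def sort_ips(ips):
--     """
--     Sorts a list of IP addresses, sorts the IPv4 addresses as integers, and appends the sorted IPv6 addresses to the sorted IPv4 addresses.
--     Args: ips (list) - a list of IP addresses
--     Returns: List of sorted IP addresses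
--     """
--     # One stable sort with a composite list key: group flag first (0 = IPv4, 1 = IPv6),
--     # then numeric octets for IPv4 or character codes for IPv6.
--     def _key(x):
--         if '.' in x:
--             return [0] + [int(p) for p in x.split('.')]
--         return [1] + [ord(c) for c in x]
--
--     return sorted(ips, key=_key)
-- ===== Notes on version B (the rewrite author's own statement) =====
-- stated objective: idiomatic
-- what changed: Replaced the explicit two-list partition, two separate sorts and list concatenation with a single sorted() call over the whole input using a composite list key (group flag, then numeric octets for IPv4 or character codes for IPv6), relying on sort stability for ties.
import Mathlib
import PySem

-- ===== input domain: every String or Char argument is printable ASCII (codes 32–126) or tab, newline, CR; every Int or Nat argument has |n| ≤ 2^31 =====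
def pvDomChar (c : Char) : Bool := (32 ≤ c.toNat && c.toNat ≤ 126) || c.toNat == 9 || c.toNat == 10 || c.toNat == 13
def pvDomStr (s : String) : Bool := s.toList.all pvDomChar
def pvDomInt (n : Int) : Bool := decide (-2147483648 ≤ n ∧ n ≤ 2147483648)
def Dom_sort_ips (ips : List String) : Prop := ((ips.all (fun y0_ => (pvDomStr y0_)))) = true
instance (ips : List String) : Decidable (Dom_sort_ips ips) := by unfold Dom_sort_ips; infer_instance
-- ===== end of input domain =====

-- B replaces A's partition + two sorts + concatenation with one stable sort under a
-- composite list key (group flag, then octets / char codes); same results, more idiomatic.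


-- shared helper: [int(i) for i in x.split('.')]; the '.getD 0' is unreachable under
-- Pre_sort_ips (Python raises ValueError exactly where ofStr? is none)
def pvParts (x : String) : List Int :=
  ((PySem.Str.split? x ".").getD []).map (fun p => (PySem.Int.ofStr? p).getD 0)

-- ===== PORT A =====
def sort_ips (ips : List String) : List String :=
  let acc := ips.foldl
    (fun (acc : List String × List String) ip =>
      if PySem.Str.isIn "." ip then (acc.1 ++ [ip], acc.2) else (acc.1, acc.2 ++ [ip]))
    ([], [])
  PySem.List.sorted acc.1 (fun x => pvParts x) false
    ++ PySem.List.sorted acc.2 (fun x => x) false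

-- ===== PORT B =====
-- Source B's _key: [0] + octets for IPv4, [1] + [ord(c) for c in x] for IPv6
def pvKeyB (x : String) : List Int :=
  if PySem.Str.isIn "." x then 0 :: pvParts x
  else 1 :: x.toList.map (fun c => (c.toNat : Int))

def sort_ips_alt (ips : List String) : List String :=
  PySem.List.sorted ips pvKeyB false

-- ===== PRECONDITION & SPEC =====
-- Pre_ excludes exactly the inputs where Python A raises ValueError: a string containing
-- '.' whose '.'-separated pieces are not all parseable by int().
def Pre_sort_ips (ips : List String) : Prop :=
  ∀ s ∈ ips, PySem.Str.isIn "." s = true →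
    ∀ p ∈ (PySem.Str.split? s ".").getD [], (PySem.Int.ofStr? p).isSome = true
instance (ips : List String) : Decidable (Pre_sort_ips ips) := by
  unfold Pre_sort_ips; infer_instance

def pvWitness_sort_ips : List String := ["10.0.0.2", "1.2.3.4", "fe80::1", "::1"]

def Spec_sort_ips (ips : List String) (out : List String) : Prop := out = sort_ips_alt ips
instance (ips : List String) (out : List String) : Decidable (Spec_sort_ips ips out) := by
  unfold Spec_sort_ips; infer_instance

-- ===== CLAIM (what is proved, stated in full; the proofs are below) =====
def Claim_equal_sort_ips : Prop :=
  ∀ (ips : List String), Dom_sort_ips ips → Pre_sort_ips ips → Spec_sort_ips ips (sort_ips ips)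

-- ===== LEMMAS AND PROOFS =====

-- A's partition loop filters the list twice
theorem pv_partition (l : List String) (a b : List String) :
    l.foldl (fun (acc : List String × List String) ip =>
        if PySem.Str.isIn "." ip then (acc.1 ++ [ip], acc.2) else (acc.1, acc.2 ++ [ip])) (a, b)
      = (a ++ l.filter (fun x => PySem.Str.isIn "." x),
         b ++ l.filter (fun x => !PySem.Str.isIn "." x)) := by
  induction l generalizing a b with
  | nil => simp
  | cons x t ih =>
    rw [List.foldl_cons]
    by_cases h : PySem.Str.isIn "." x = true
    · rw [if_pos h, ih]
      have h' : PySem.Chars.isIn ['.'] x.toList = true := by simpa using h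
      simp [h']
    · rw [if_neg h, ih]
      have h' : PySem.Chars.isIn ['.'] x.toList = false := by simpa using eq_false_of_ne_true h
      simp [h']

-- list-lex order facts about the composite key
theorem pv_cons_lt_cons (c : Int) (a b : List Int) : (c :: a) < (c :: b) ↔ a < b := by
  rw [show ((c :: a) < (c :: b)) ↔ List.Lex (· < ·) (c :: a) (c :: b) from List.lt_iff_lex_lt _ _,
    show (a < b) ↔ List.Lex (· < ·) a b from List.lt_iff_lex_lt _ _]
  constructor
  · intro h
    cases h with
    | cons h => exact h
    | rel h => exact absurd h (lt_irrefl c)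
  · exact List.Lex.cons

theorem pv_zero_lt_one (a b : List Int) : (0 :: a) < (1 :: b) := by
  rw [show ((0 :: a) < (1 :: b)) ↔ List.Lex (· < ·) (0 :: a) (1 :: b) from List.lt_iff_lex_lt _ _]
  exact List.Lex.rel (by norm_num)

theorem pv_one_not_lt_zero (a b : List Int) : ¬ ((1 :: a) < (0 :: b)) := by
  rw [show ((1 :: a) < (0 :: b)) ↔ List.Lex (· < ·) (1 :: a) (0 :: b) from List.lt_iff_lex_lt _ _]
  intro h
  cases h with
  | rel h => norm_num at h

-- the char-code map preserves lexicographic order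
theorem pv_map_code_lt (a b : List Char) :
    a.map (fun c => (c.toNat : Int)) < b.map (fun c => (c.toNat : Int)) ↔ a < b := by
  rw [show (a.map (fun c => (c.toNat : Int)) < b.map (fun c => (c.toNat : Int)))
        ↔ List.Lex (· < ·) (a.map (fun c => (c.toNat : Int))) (b.map (fun c => (c.toNat : Int)))
      from List.lt_iff_lex_lt _ _,
    show (a < b) ↔ List.Lex (· < ·) a b from List.lt_iff_lex_lt _ _]
  have fwd : ∀ (u v : List Char), List.Lex (· < ·) u v →
      List.Lex (· < ·) (u.map (fun c => (c.toNat : Int))) (v.map (fun c => (c.toNat : Int))) := by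
    intro u v h
    induction h with
    | nil => exact List.Lex.nil
    | cons _ ih => exact List.Lex.cons ih
    | rel hr => exact List.Lex.rel (by simpa [Char.lt_def] using hr)
  constructor
  · intro h
    rcases lt_trichotomy a b with h1 | h1 | h1
    · exact (List.lt_iff_lex_lt a b).mp h1
    · subst h1
      have h' : a.map (fun c => (c.toNat : Int)) < a.map (fun c => (c.toNat : Int)) :=
        (List.lt_iff_lex_lt _ _).mpr h
      exact absurd h' (lt_irrefl _)
    · have h2 : b.map (fun c => (c.toNat : Int)) < a.map (fun c => (c.toNat : Int)) :=
        (List.lt_iff_lex_lt _ _).mpr (fwd b a ((List.lt_iff_lex_lt b a).mp h1))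
      have h' : a.map (fun c => (c.toNat : Int)) < b.map (fun c => (c.toNat : Int)) :=
        (List.lt_iff_lex_lt _ _).mpr h
      exact absurd (lt_trans h' h2) (lt_irrefl _)
  · exact fwd a b

-- key comparisons by group
theorem pv_key_v4 (a b : String) (ha : PySem.Str.isIn "." a = true) (hb : PySem.Str.isIn "." b = true) :
    (pvKeyB a < pvKeyB b) ↔ (pvParts a < pvParts b) := by
  simp only [pvKeyB, ha, hb, if_true]; exact pv_cons_lt_cons 0 _ _

theorem pv_key_v6 (a b : String) (ha : PySem.Str.isIn "." a = false) (hb : PySem.Str.isIn "." b = false) :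
    (pvKeyB a < pvKeyB b) ↔ (a < b) := by
  simp only [pvKeyB, ha, hb, Bool.false_eq_true, if_false]
  rw [pv_cons_lt_cons 1, pv_map_code_lt, String.lt_iff_toList_lt]

theorem pv_key_cross (a b : String) (ha : PySem.Str.isIn "." a = true) (hb : PySem.Str.isIn "." b = false) :
    pvKeyB a < pvKeyB b := by
  simp only [pvKeyB, ha, hb, Bool.false_eq_true, if_true, if_false]
  exact pv_zero_lt_one _ _

theorem pv_key_cross' (a b : String) (ha : PySem.Str.isIn "." a = false) (hb : PySem.Str.isIn "." b = true) :
    ¬ (pvKeyB a < pvKeyB b) := by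
  simp only [pvKeyB, ha, hb, Bool.false_eq_true, if_true, if_false]
  exact pv_one_not_lt_zero _ _

-- insertion is insensitive to the comparison outside the touched elements
theorem pv_insertBy_congr (p q : String → String → Bool) (x : String) (ys : List String)
    (h : ∀ y ∈ ys, p x y = q x y) :
    PySem.List.insertBy p x ys = PySem.List.insertBy q x ys := by
  induction ys with
  | nil => rfl
  | cons y t ih =>
    show (if p x y then _ else _) = (if q x y then _ else _)
    rw [h y (by simp)]
    by_cases hq : q x y = true
    · rw [if_pos hq, if_pos hq]
    · rw [if_neg hq, if_neg hq, ih (fun z hz => h z (by simp [hz]))]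

theorem pv_foldl_insert_congr (p q : String → String → Bool) (S : List String)
    (hpq : ∀ a ∈ S, ∀ b ∈ S, p a b = q a b) :
    ∀ (l acc : List String), (∀ x ∈ l, x ∈ S) → (∀ x ∈ acc, x ∈ S) →
      l.foldl (fun acc x => PySem.List.insertBy p x acc) acc
        = l.foldl (fun acc x => PySem.List.insertBy q x acc) acc := by
  intro l
  induction l with
  | nil => intro acc _ _; rfl
  | cons x t ih =>
    intro acc hl hacc
    have hx : x ∈ S := hl x (by simp)
    rw [List.foldl_cons, List.foldl_cons,
      pv_insertBy_congr p q x acc (fun y hy => hpq x hx y (hacc y hy))]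
    exact ih _ (fun z hz => hl z (by simp [hz]))
      (fun z hz => by
        rcases (PySem.List.mem_insertBy q x z acc).mp hz with h | h
        · exact h ▸ hx
        · exact hacc z h)

-- two sorts of the same list agree when their keys compare identically on its elements
theorem pv_sorted_congr {κ₁ κ₂ : Type} [LT κ₁] [DecidableLT κ₁] [LT κ₂] [DecidableLT κ₂]
    (xs : List String) (k1 : String → κ₁) (k2 : String → κ₂)
    (h : ∀ a ∈ xs, ∀ b ∈ xs, decide (k1 a < k1 b) = decide (k2 a < k2 b)) :
    PySem.List.sorted xs k1 false = PySem.List.sorted xs k2 false := by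
  rw [PySem.List.sorted_eq_foldl_insertBy, PySem.List.sorted_eq_foldl_insertBy]
  exact pv_foldl_insert_congr _ _ xs h xs [] (fun _ hx => hx) (fun _ hx => by cases hx)

-- inserting an element everything in the prefix precedes skips the prefix
theorem pv_insertBy_skip (p : String → String → Bool) (x : String) :
    ∀ (l1 l2 : List String), (∀ y ∈ l1, p x y = false) →
      PySem.List.insertBy p x (l1 ++ l2) = l1 ++ PySem.List.insertBy p x l2 := by
  intro l1
  induction l1 with
  | nil => intro l2 _; rfl
  | cons y t ih =>
    intro l2 h
    show (if p x y then _ else _) = _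
    rw [h y (by simp), if_neg (by simp)]
    show y :: PySem.List.insertBy p x (t ++ l2) = y :: (t ++ PySem.List.insertBy p x l2)
    rw [ih l2 (fun z hz => h z (by simp [hz]))]

-- inserting an element that precedes the whole suffix stays in the prefix
theorem pv_insertBy_left (p : String → String → Bool) (x : String) (B : List String)
    (hB : ∀ b ∈ B, p x b = true) :
    ∀ A : List String, PySem.List.insertBy p x (A ++ B) = PySem.List.insertBy p x A ++ B := by
  intro A
  induction A with
  | nil =>
    cases B with
    | nil => rfl
    | cons b t =>
      show (if p x b then _ else _) = _
      rw [hB b (by simp), if_pos rfl]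
      rfl
  | cons a t ih =>
    show (if p x a then _ else _) = (if p x a then _ else _) ++ B
    by_cases h : p x a = true
    · rw [if_pos h, if_pos h]; rfl
    · rw [if_neg h, if_neg h]
      show a :: PySem.List.insertBy p x (t ++ B) = a :: (PySem.List.insertBy p x t ++ B)
      rw [ih]

-- B's single sort splits into the sort of the IPv4 part followed by the sort of the IPv6 part
theorem pv_sorted_split (ips : List String) :
    PySem.List.sorted ips pvKeyB false =
      PySem.List.sorted (ips.filter (fun x => PySem.Str.isIn "." x)) pvKeyB false ++
      PySem.List.sorted (ips.filter (fun x => !PySem.Str.isIn "." x)) pvKeyB false := by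
  induction ips using List.reverseRecOn with
  | nil => rfl
  | append_singleton l x ih =>
    rw [PySem.List.sorted_eq_foldl_insertBy, List.foldl_append, List.foldl_cons, List.foldl_nil,
      ← PySem.List.sorted_eq_foldl_insertBy, ih, List.filter_append, List.filter_append]
    by_cases h : PySem.Str.isIn "." x = true
    · rw [pv_insertBy_left _ x _ (fun b hb => by
        have hb' := (PySem.List.mem_sorted _ _ _ _).mp hb
        have := (List.mem_filter.mp hb').2
        exact decide_eq_true (pv_key_cross x b h (by simpa using this)))]
      have h' : PySem.Chars.isIn ['.'] x.toList = true := by simpa using h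
      have e1 : List.filter (fun x => PySem.Str.isIn "." x) [x] = [x] := by simp [h']
      have e2 : List.filter (fun x => !PySem.Str.isIn "." x) [x] = [] := by simp [h']
      rw [e1, e2, List.append_nil,
        PySem.List.sorted_eq_foldl_insertBy (l.filter (fun x => PySem.Str.isIn "." x) ++ [x]),
        List.foldl_append, List.foldl_cons, List.foldl_nil, ← PySem.List.sorted_eq_foldl_insertBy]
    · rw [pv_insertBy_skip _ x _ _ (fun y hy => by
        have hy' := (PySem.List.mem_sorted _ _ _ _).mp hy
        have := (List.mem_filter.mp hy').2
        exact decide_eq_false (pv_key_cross' x y (eq_false_of_ne_true h) this))]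
      have h' : PySem.Chars.isIn ['.'] x.toList = false := by
        simpa using eq_false_of_ne_true h
      have e1 : List.filter (fun x => PySem.Str.isIn "." x) [x] = [] := by simp [h']
      have e2 : List.filter (fun x => !PySem.Str.isIn "." x) [x] = [x] := by simp [h']
      rw [e1, e2, List.append_nil,
        PySem.List.sorted_eq_foldl_insertBy (l.filter (fun x => !PySem.Str.isIn "." x) ++ [x]),
        List.foldl_append, List.foldl_cons, List.foldl_nil, ← PySem.List.sorted_eq_foldl_insertBy]

-- ===== VERDICT (by name: the statement is the Claim_ definition above) =====
theorem sort_ips_spec : Claim_equal_sort_ips := by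
  intro ips _ _
  show sort_ips ips = sort_ips_alt ips
  rw [sort_ips, sort_ips_alt, pv_partition, pv_sorted_split]
  simp only [List.nil_append]
  congr 1
  · exact pv_sorted_congr _ (fun x => pvParts x) pvKeyB (fun a ha b hb => by
      rw [decide_eq_decide]
      exact (pv_key_v4 a b (List.mem_filter.mp ha).2 (List.mem_filter.mp hb).2).symm)
  · exact pv_sorted_congr _ (fun x => x) pvKeyB (fun a ha b hb => by
      rw [decide_eq_decide]
      exact (pv_key_v6 a b (by simpa using (List.mem_filter.mp ha).2)
        (by simpa using (List.mem_filter.mp hb).2)).symm)
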